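-- pv_equiv track=rewrite | github.com/Clippis-OSR/osr-digitalgame | sww/spellcasting.py | spell_level_num
-- ===== SOURCE A (Python) =====
-- def spell_level_num(spell_level_field: str) -> int:
--     """Parse "1st level" / "2nd level" etc into an integer."""
--     s = (spell_level_field or "").lower()
--     for n in range(1, 10):
--         if f"{n}st" in s or f"{n}nd" in s or f"{n}rd" in s or f"{n}th" in s:
--             return n
--     # Some extracted datasets might use "Level 1" or similar.
--     for n in range(1, 10):
--         if f"level {n}" in s:
--             return n
--     return 1
-- ===== SOURCE B (Python) =====
-- def spell_level_num(spell_level_field: str) -> int: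
--     """Parse "1st level" / "2nd level" etc into an integer.
--
--     Single left-to-right scan over the string, tracking the minimum ordinal
--     digit and the minimum level-prefixed digit at once; A's priority (ordinals
--     first) is applied only at the end.
--     """
--     s = (spell_level_field or "").lower()
--     n = len(s)
--     ord_best = 0
--     lvl_best = 0
--     for i in range(n):
--         c = s[i]
--         if "1" <= c <= "9" and s[i + 1:i + 3] in ("st", "nd", "rd", "th"):
--             d = ord(c) - 48
--             if ord_best == 0 or d < ord_best:
--                 ord_best = d
--         if s.startswith("level ", i) and i + 6 < n and "1" <= s[i + 6] <= "9":
--             d = ord(s[i + 6]) - 48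
--             if lvl_best == 0 or d < lvl_best:
--                 lvl_best = d
--     if ord_best:
--         return ord_best
--     if lvl_best:
--         return lvl_best
--     return 1
-- ===== Notes on version B (the rewrite author's own statement) =====
-- stated objective: alternative
-- what changed: A makes up to 18 whole-string substring scans (two fixed n=1..9 passes with four 'in' tests each); B makes one left-to-right scan over the string positions, tracking the minimum ordinal digit and the minimum level-prefixed digit simultaneously and applying A's ordinal-first priority only at the end.
import Mathlib
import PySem

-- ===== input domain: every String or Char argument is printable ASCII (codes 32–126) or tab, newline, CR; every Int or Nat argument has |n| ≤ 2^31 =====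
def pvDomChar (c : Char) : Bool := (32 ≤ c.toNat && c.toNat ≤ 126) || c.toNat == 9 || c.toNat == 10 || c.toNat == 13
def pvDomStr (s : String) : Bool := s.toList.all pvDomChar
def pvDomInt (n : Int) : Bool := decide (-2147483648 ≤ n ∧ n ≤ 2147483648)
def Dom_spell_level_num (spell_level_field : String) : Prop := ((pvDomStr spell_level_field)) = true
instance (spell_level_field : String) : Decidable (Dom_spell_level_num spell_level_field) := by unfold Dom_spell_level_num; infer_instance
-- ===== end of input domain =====

-- B replaces A's 18 substring scans (two n = 1..9 passes over the whole string) by ONE left-to-right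
-- scan of the string that tracks the minimum ordinal digit and the minimum level-prefixed digit at once
-- (objective: alternative).

-- ===== PORT A =====
-- early-returning 'for n in range(1, 10)' loop of the first pass, as recursion over the range list
def aOrdLoop (s : List Char) : List Int → Option Int
  | [] => none
  | n :: rest =>
    if PySem.Chars.isIn (PySem.Int.toChars n ++ ['s','t']) s
       || PySem.Chars.isIn (PySem.Int.toChars n ++ ['n','d']) s
       || PySem.Chars.isIn (PySem.Int.toChars n ++ ['r','d']) s
       || PySem.Chars.isIn (PySem.Int.toChars n ++ ['t','h']) s
    then some n else aOrdLoop s rest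

-- early-returning 'for n in range(1, 10)' loop of the second pass
def aLvlLoop (s : List Char) : List Int → Option Int
  | [] => none
  | n :: rest =>
    if PySem.Chars.isIn (['l','e','v','e','l',' '] ++ PySem.Int.toChars n) s
    then some n else aLvlLoop s rest

def spell_level_num (spell_level_field : String) : Int :=
  -- `spell_level_field or ""` is the identity on strings ("" is falsy and `or` then yields ""): ported as the string itself
  let s := PySem.Chars.lower spell_level_field.toList
  match aOrdLoop s (PySem.List.pyRange 1 10 1) with
  | some n => n
  | none =>
    match aLvlLoop s (PySem.List.pyRange 1 10 1) with
    | some n => n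
    | none => 1

-- ===== PORT B =====
-- Source B's `for i in range(n)` loop; the index i is represented by the suffix t = s[i:], so
-- c = s[i] is t's head, s[i+1:i+3] is PySem.List.slice t 1 3, s.startswith("level ", i) is
-- PySem.Chars.startswith t, and s[i+6] (with the guard i + 6 < n) is pyGet? t 6 (some x exactly
-- when i + 6 < n, so the length guard is folded into the lookup). Python's comparisons
-- "1" <= c <= "9" on one-character strings are exactly char comparisons; ord(c) - 48 is
-- (c.toNat : Int) - 48. (ob, lb) are (ord_best, lvl_best).
def bScan : List Char → Int → Int → Int × Int
  | [], ob, lb => (ob, lb)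
  | c :: rest, ob, lb =>
    let t := c :: rest
    let ob' := if ('1' ≤ c ∧ c ≤ '9') ∧
        (PySem.List.slice t (some 1) (some 3) = ['s','t'] ∨ PySem.List.slice t (some 1) (some 3) = ['n','d'] ∨
         PySem.List.slice t (some 1) (some 3) = ['r','d'] ∨ PySem.List.slice t (some 1) (some 3) = ['t','h'])
      then (let d : Int := (c.toNat : Int) - 48; if ob = 0 ∨ d < ob then d else ob) else ob
    let lb' :=
      if PySem.Chars.startswith t ['l','e','v','e','l',' '] then
        match PySem.List.pyGet? t 6 with
        | some x =>
          if '1' ≤ x ∧ x ≤ '9' then (let d : Int := (x.toNat : Int) - 48; if lb = 0 ∨ d < lb then d else lb) else lb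
        | none => lb
      else lb
    bScan rest ob' lb'

def spell_level_num_alt (spell_level_field : String) : Int :=
  let s := PySem.Chars.lower spell_level_field.toList
  let r := bScan s 0 0
  if r.1 ≠ 0 then r.1 else if r.2 ≠ 0 then r.2 else 1

-- ===== PRECONDITION & SPEC =====
def Spec_spell_level_num (spell_level_field : String) (out : Int) : Prop := out = spell_level_num_alt spell_level_field
instance (spell_level_field : String) (out : Int) : Decidable (Spec_spell_level_num spell_level_field out) := by unfold Spec_spell_level_num; infer_instance

-- ===== CLAIM (what is proved, stated in full; the proofs are below) =====
def Claim_equal_spell_level_num : Prop := ∀ (spell_level_field : String), Dom_spell_level_num spell_level_field → Spec_spell_level_num spell_level_field (spell_level_num spell_level_field)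

-- ===== LEMMAS AND PROOFS =====

-- the Int value of a digit character
def chVal (c : Char) : Int := (c.toNat : Int) - 48

def digitsL : List Char := ['1','2','3','4','5','6','7','8','9']

-- the ordinal match at the head of a suffix, if any
def ordHit? : List Char → Option Int
  | [] => none
  | c :: rest =>
    if ('1' ≤ c ∧ c ≤ '9') ∧
       (rest.take 2 = ['s','t'] ∨ rest.take 2 = ['n','d'] ∨ rest.take 2 = ['r','d'] ∨ rest.take 2 = ['t','h'])
    then some (chVal c) else none

-- the "level N" match at the head of a suffix, if any
def lvlHit? (t : List Char) : Option Int :=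
  if ['l','e','v','e','l',' '] <+: t then
    match t[6]? with
    | some x => if '1' ≤ x ∧ x ≤ '9' then some (chVal x) else none
    | none => none
  else none

def allHits (f : List Char → Option Int) : List Char → List Int
  | [] => []
  | c :: rest => (f (c :: rest)).toList ++ allHits f rest

def mmin (acc : Int) (l : List Int) : Int := l.foldl (fun a d => if a = 0 ∨ d < a then d else a) acc

-- A's first-match-wins scan over the digit characters in increasing order
def firstHit (P : Char → Bool) : List Char → Option Int
  | [] => none
  | c :: ds => if P c then some (chVal c) else firstHit P ds

def pOrd (s : List Char) (c : Char) : Bool :=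
  PySem.Chars.isIn (c :: ['s','t']) s || PySem.Chars.isIn (c :: ['n','d']) s ||
  PySem.Chars.isIn (c :: ['r','d']) s || PySem.Chars.isIn (c :: ['t','h']) s

def pLvl (s : List Char) (c : Char) : Bool :=
  PySem.Chars.isIn (['l','e','v','e','l',' '] ++ [c]) s

lemma slice13 (c : Char) (r : List Char) : PySem.List.slice (c :: r) (some 1) (some 3) = r.take 2 := by
  have := PySem.List.slice_natCast (c :: r) 1 3
  norm_num at this; simpa using this

lemma mmin_append (acc : Int) (l₁ l₂ : List Int) : mmin acc (l₁ ++ l₂) = mmin (mmin acc l₁) l₂ := by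
  simp [mmin, List.foldl_append]

lemma bScan_spec (t : List Char) (ob lb : Int) :
    bScan t ob lb = (mmin ob (allHits ordHit? t), mmin lb (allHits lvlHit? t)) := by
  induction t generalizing ob lb with
  | nil => simp [bScan, allHits, mmin]
  | cons c rest ih =>
    rw [bScan, ih]
    simp only [allHits, mmin_append]
    congr 1
    · congr 1
      rw [ordHit?]
      simp only [slice13]
      split_ifs with h h2 <;>
        simp only [Option.toList, mmin, List.foldl, chVal] <;>
        first | rfl | simp [h2]
    · congr 1
      rw [lvlHit?]
      have hs : (PySem.Chars.startswith (c :: rest) ['l','e','v','e','l',' '] = true) ↔ ['l','e','v','e','l',' '] <+: (c :: rest) :=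
        PySem.Chars.startswith_iff _ _
      have hg : PySem.List.pyGet? (c :: rest) 6 = (c :: rest)[6]? := by
        have := PySem.List.pyGet?_natCast (c :: rest) 6
        norm_num at this; simpa using this
      by_cases hpre : ['l','e','v','e','l',' '] <+: (c :: rest)
      · rw [if_pos (hs.mpr hpre), if_pos hpre, hg]
        cases hx : (c :: rest)[6]? with
        | none => simp [mmin]
        | some x =>
          dsimp only
          split_ifs with h h2 <;>
            simp only [Option.toList, mmin, List.foldl, chVal] <;>
            first | rfl | simp [h2]
      · rw [if_neg (fun hh => hpre (hs.mp hh)), if_neg hpre]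
        simp [mmin]

lemma aOrdLoop_eq (s : List Char) :
    aOrdLoop s (PySem.List.pyRange 1 10 1) = firstHit (pOrd s) digitsL := by
  rw [show PySem.List.pyRange 1 10 1 = [1,2,3,4,5,6,7,8,9] from by decide]
  simp only [aOrdLoop, firstHit, digitsL, pOrd,
    show PySem.Int.toChars 1 = ['1'] from rfl, show PySem.Int.toChars 2 = ['2'] from rfl,
    show PySem.Int.toChars 3 = ['3'] from rfl, show PySem.Int.toChars 4 = ['4'] from rfl,
    show PySem.Int.toChars 5 = ['5'] from rfl, show PySem.Int.toChars 6 = ['6'] from rfl,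
    show PySem.Int.toChars 7 = ['7'] from rfl, show PySem.Int.toChars 8 = ['8'] from rfl,
    show PySem.Int.toChars 9 = ['9'] from rfl, List.cons_append, List.nil_append]
  split_ifs <;> simp [chVal]

lemma aLvlLoop_eq (s : List Char) :
    aLvlLoop s (PySem.List.pyRange 1 10 1) = firstHit (pLvl s) digitsL := by
  rw [show PySem.List.pyRange 1 10 1 = [1,2,3,4,5,6,7,8,9] from by decide]
  simp only [aLvlLoop, firstHit, digitsL, pLvl,
    show PySem.Int.toChars 1 = ['1'] from rfl, show PySem.Int.toChars 2 = ['2'] from rfl,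
    show PySem.Int.toChars 3 = ['3'] from rfl, show PySem.Int.toChars 4 = ['4'] from rfl,
    show PySem.Int.toChars 5 = ['5'] from rfl, show PySem.Int.toChars 6 = ['6'] from rfl,
    show PySem.Int.toChars 7 = ['7'] from rfl, show PySem.Int.toChars 8 = ['8'] from rfl,
    show PySem.Int.toChars 9 = ['9'] from rfl, List.cons_append, List.nil_append]
  split_ifs <;> simp [chVal]

lemma char_eq_of_toNat_eq {a b : Char} (h : a.toNat = b.toNat) : a = b := by
  apply Char.ext; exact UInt32.toNat_inj.mp h

lemma digit_mem (c : Char) (h1 : '1' ≤ c) (h2 : c ≤ '9') : c ∈ digitsL := by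
  have h1' : 49 ≤ c.toNat := h1
  have h2' : c.toNat ≤ 57 := h2
  interval_cases h : c.toNat <;> simp [digitsL] <;>
    first
    | exact Or.inl (char_eq_of_toNat_eq h)
    | exact Or.inr (Or.inl (char_eq_of_toNat_eq h))
    | exact Or.inr (Or.inr (Or.inl (char_eq_of_toNat_eq h)))
    | exact Or.inr (Or.inr (Or.inr (Or.inl (char_eq_of_toNat_eq h))))
    | exact Or.inr (Or.inr (Or.inr (Or.inr (Or.inl (char_eq_of_toNat_eq h)))))
    | exact Or.inr (Or.inr (Or.inr (Or.inr (Or.inr (Or.inl (char_eq_of_toNat_eq h))))))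
    | exact Or.inr (Or.inr (Or.inr (Or.inr (Or.inr (Or.inr (Or.inl (char_eq_of_toNat_eq h)))))))
    | exact Or.inr (Or.inr (Or.inr (Or.inr (Or.inr (Or.inr (Or.inr (Or.inl (char_eq_of_toNat_eq h))))))))
    | exact Or.inr (Or.inr (Or.inr (Or.inr (Or.inr (Or.inr (Or.inr (Or.inr (char_eq_of_toNat_eq h))))))))

lemma mem_digit (c : Char) (h : c ∈ digitsL) : '1' ≤ c ∧ c ≤ '9' := by
  fin_cases h <;> exact ⟨by decide, by decide⟩

lemma mem_allHits (f : List Char → Option Int) (hf : f [] = none) (t : List Char) (d : Int) :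
    d ∈ allHits f t ↔ ∃ j, f (t.drop j) = some d := by
  induction t with
  | nil => simp [allHits, hf]
  | cons c rest ih =>
    simp only [allHits, List.mem_append, ih, Option.mem_toList]
    constructor
    · rintro (h | ⟨j, hj⟩)
      · exact ⟨0, by simpa using h⟩
      · exact ⟨j + 1, by simpa using hj⟩
    · rintro ⟨j, hj⟩
      cases j with
      | zero => exact Or.inl (by simpa using hj)
      | succ j => exact Or.inr ⟨j, by simpa using hj⟩

lemma take_two_prefix {x y : Char} {r : List Char} : r.take 2 = [x, y] ↔ [x, y] <+: r := by
  rw [List.prefix_iff_eq_take]; exact eq_comm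

lemma mem_allHits_ord (s : List Char) (d : Int) :
    d ∈ allHits ordHit? s ↔ ∃ c, c ∈ digitsL ∧ pOrd s c = true ∧ d = chVal c := by
  rw [mem_allHits ordHit? rfl]
  constructor
  · rintro ⟨j, hj⟩
    rcases hu : s.drop j with _ | ⟨c, rest⟩ <;> rw [hu] at hj
    · simp [ordHit?] at hj
    · rw [ordHit?] at hj
      split_ifs at hj with h
      · rcases h with ⟨⟨h1, h2⟩, hpat⟩
        have isin : ∀ x y : Char, rest.take 2 = [x, y] → PySem.Chars.isIn (c :: [x, y]) s = true := by
          intro x y hxy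
          refine (PySem.Chars.exists_prefix_drop_iff_isIn _ s).mp ⟨j, ?_⟩
          rw [hu]; exact List.cons_prefix_cons.mpr ⟨rfl, take_two_prefix.mp hxy⟩
        refine ⟨c, digit_mem c h1 h2, ?_, by simpa using hj.symm⟩
        rw [pOrd]
        rcases hpat with h | h | h | h <;> simp [isin _ _ h]
  · rintro ⟨c, hc, hp, rfl⟩
    obtain ⟨h1, h2⟩ := mem_digit c hc
    have key : ∀ x y : Char, PySem.Chars.isIn (c :: [x, y]) s = true →
        ([x, y] = ['s','t'] ∨ [x, y] = ['n','d'] ∨ [x, y] = ['r','d'] ∨ [x, y] = ['t','h']) →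
        ∃ j, ordHit? (s.drop j) = some (chVal c) := by
      intro x y hin hxy
      obtain ⟨j, hpre⟩ := (PySem.Chars.exists_prefix_drop_iff_isIn _ s).mpr hin
      obtain ⟨t, ht⟩ := hpre
      refine ⟨j, ?_⟩
      rw [← ht]
      show ordHit? (c :: (x :: y :: t)) = _
      rw [ordHit?, if_pos]
      refine ⟨⟨h1, h2⟩, ?_⟩
      simpa using hxy
    rw [pOrd] at hp
    simp only [Bool.or_eq_true] at hp
    rcases hp with ((hp | hp) | hp) | hp
    · exact key 's' 't' hp (by simp)
    · exact key 'n' 'd' hp (by simp)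
    · exact key 'r' 'd' hp (by simp)
    · exact key 't' 'h' hp (by simp)

lemma mem_allHits_lvl (s : List Char) (d : Int) :
    d ∈ allHits lvlHit? s ↔ ∃ c, c ∈ digitsL ∧ pLvl s c = true ∧ d = chVal c := by
  rw [mem_allHits lvlHit? rfl]
  constructor
  · rintro ⟨j, hj⟩
    rw [lvlHit?] at hj
    split_ifs at hj with hpre
    · rcases hx : (s.drop j)[6]? with _ | x <;> rw [hx] at hj
      · simp at hj
      · dsimp only at hj
        split_ifs at hj with h
        · obtain ⟨h1, h2⟩ := h
          refine ⟨x, digit_mem x h1 h2, ?_, by simpa using hj.symm⟩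
          rw [pLvl]
          refine (PySem.Chars.exists_prefix_drop_iff_isIn _ s).mp ⟨j, ?_⟩
          obtain ⟨t, ht⟩ := hpre
          have hx' : t[0]? = some x := by
            rw [← ht] at hx; simpa using hx
          rcases t with _ | ⟨x', t'⟩
          · simp at hx'
          · obtain rfl : x' = x := by simpa using hx'
            exact ⟨t', by rw [← ht]; simp⟩
  · rintro ⟨c, hc, hp, rfl⟩
    obtain ⟨h1, h2⟩ := mem_digit c hc
    rw [pLvl] at hp
    obtain ⟨j, hpre⟩ := (PySem.Chars.exists_prefix_drop_iff_isIn _ s).mpr hp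
    obtain ⟨t, ht⟩ := hpre
    refine ⟨j, ?_⟩
    rw [lvlHit?, if_pos, show (s.drop j)[6]? = some c from by rw [← ht]; simp]
    · simp [h1, h2]
    · exact ⟨[c] ++ t, by rw [← ht]; simp⟩

lemma mmin_acc (l : List Int) : ∀ acc : Int, 1 ≤ acc → (∀ d ∈ l, 1 ≤ d) →
    (mmin acc l = acc ∨ mmin acc l ∈ l) ∧ mmin acc l ≤ acc ∧ ∀ d ∈ l, mmin acc l ≤ d := by
  induction l with
  | nil => intro acc hacc _; simp [mmin]
  | cons d r ih =>
    intro acc hacc hl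
    have hd : 1 ≤ d := hl d (by simp)
    have step : mmin acc (d :: r) = mmin (if d < acc then d else acc) r := by
      simp only [mmin, List.foldl]
      congr 1
      have : ¬ acc = 0 := by omega
      simp [this]
    set acc' := if d < acc then d else acc with hacc'
    have h1 : 1 ≤ acc' := by rw [hacc']; split_ifs <;> omega
    obtain ⟨hmem, hle, hall⟩ := ih acc' h1 (fun x hx => hl x (by simp [hx]))
    rw [step]
    refine ⟨?_, ?_, ?_⟩
    · rcases hmem with h | h
      · rw [h, hacc']; split_ifs with hda
        · exact Or.inr (by simp)
        · exact Or.inl rfl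
      · exact Or.inr (by simp [h])
    · refine le_trans hle ?_
      rw [hacc']; split_ifs <;> omega
    · intro x hx
      rcases List.mem_cons.mp hx with rfl | hx
      · refine le_trans hle ?_
        rw [hacc']; split_ifs <;> omega
      · exact hall x hx

lemma mmin_zero_spec (l : List Int) (hl : ∀ d ∈ l, 1 ≤ d) (hne : l ≠ []) :
    mmin 0 l ∈ l ∧ ∀ d ∈ l, mmin 0 l ≤ d := by
  rcases l with _ | ⟨d, r⟩
  · exact absurd rfl hne
  · have hd : 1 ≤ d := hl d (by simp)
    have step : mmin 0 (d :: r) = mmin d r := by simp [mmin]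
    obtain ⟨hmem, hle, hall⟩ := mmin_acc r d hd (fun x hx => hl x (by simp [hx]))
    rw [step]
    refine ⟨?_, ?_⟩
    · rcases hmem with h | h
      · rw [h]; exact List.mem_cons_self
      · exact List.mem_cons_of_mem _ h
    · intro x hx
      rcases List.mem_cons.mp hx with rfl | hx
      · exact hle
      · exact hall x hx

lemma firstHit_none (P : Char → Bool) (ds : List Char) (h : firstHit P ds = none) :
    ∀ c ∈ ds, P c = false := by
  induction ds with
  | nil => simp
  | cons c ds ih =>
    rw [firstHit] at h
    split_ifs at h with hp
    intro x hx
    rcases List.mem_cons.mp hx with rfl | hx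
    · simpa using hp
    · exact ih h x hx

lemma firstHit_some (P : Char → Bool) (ds : List Char)
    (hsort : ds.Pairwise (fun a b => chVal a ≤ chVal b)) {v : Int} (h : firstHit P ds = some v) :
    (∃ c, c ∈ ds ∧ P c = true ∧ v = chVal c) ∧ ∀ c ∈ ds, P c = true → v ≤ chVal c := by
  induction ds with
  | nil => simp [firstHit] at h
  | cons c ds ih =>
    rw [firstHit] at h
    rw [List.pairwise_cons] at hsort
    split_ifs at h with hp
    · obtain rfl : v = chVal c := by simpa using h.symm
      refine ⟨⟨c, by simp, hp, rfl⟩, ?_⟩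
      intro x hx _
      rcases List.mem_cons.mp hx with rfl | hx
      · exact le_refl _
      · exact hsort.1 x hx
    · obtain ⟨⟨c₀, hc₀, hpc₀, rfl⟩, hall⟩ := ih hsort.2 h
      refine ⟨⟨c₀, by simp [hc₀], hpc₀, rfl⟩, ?_⟩
      intro x hx hpx
      rcases List.mem_cons.mp hx with rfl | hx
      · exact absurd hpx (by simp [hp])
      · exact hall x hx hpx

lemma chVal_pos (c : Char) (hc : c ∈ digitsL) : 1 ≤ chVal c := by
  fin_cases hc <;> decide

lemma min_first (P : Char → Bool) (l : List Int)
    (hmem : ∀ d, d ∈ l ↔ ∃ c, c ∈ digitsL ∧ P c = true ∧ d = chVal c) :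
    mmin 0 l = (firstHit P digitsL).getD 0 := by
  have hpos : ∀ d ∈ l, 1 ≤ d := by
    intro d hd
    obtain ⟨c, hc, _, rfl⟩ := (hmem d).mp hd
    exact chVal_pos c hc
  cases hf : firstHit P digitsL with
  | none =>
    have hempty : l = [] := by
      rcases hl : l with _ | ⟨d, r⟩
      · rfl
      · obtain ⟨c, hc, hpc, _⟩ := (hmem d).mp (by simp [hl])
        rw [firstHit_none P digitsL hf c hc] at hpc
        exact absurd hpc (by simp)
    simp [hempty, mmin]
  | some v =>
    have hsort : digitsL.Pairwise (fun a b => chVal a ≤ chVal b) := by decide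
    obtain ⟨⟨c₀, hc₀, hpc₀, rfl⟩, hall⟩ := firstHit_some P digitsL hsort hf
    have hv_mem : chVal c₀ ∈ l := (hmem _).mpr ⟨c₀, hc₀, hpc₀, rfl⟩
    have hne : l ≠ [] := by intro h; rw [h] at hv_mem; simp at hv_mem
    obtain ⟨hmmem, hmall⟩ := mmin_zero_spec l hpos hne
    obtain ⟨c, hc, hpc, hm⟩ := (hmem _).mp hmmem
    have h1 : mmin 0 l ≤ chVal c₀ := hmall _ hv_mem
    have h2 : chVal c₀ ≤ mmin 0 l := by rw [hm]; exact hall c hc hpc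
    simp [le_antisymm h1 h2]

-- ===== VERDICT (by name: the statement is the Claim_ definition above) =====
theorem spell_level_num_spec : Claim_equal_spell_level_num := by
  intro s _
  unfold Spec_spell_level_num spell_level_num spell_level_num_alt
  dsimp only
  rw [bScan_spec, aOrdLoop_eq, aLvlLoop_eq]
  rw [min_first (pOrd (PySem.Chars.lower s.toList)) _ (mem_allHits_ord _),
      min_first (pLvl (PySem.Chars.lower s.toList)) _ (mem_allHits_lvl _)]
  have hsort : digitsL.Pairwise (fun a b => chVal a ≤ chVal b) := by decide
  cases hf : firstHit (pOrd (PySem.Chars.lower s.toList)) digitsL with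
  | some v =>
    obtain ⟨⟨c₀, hc₀, _, rfl⟩, _⟩ := firstHit_some _ digitsL hsort hf
    have := chVal_pos c₀ hc₀
    simp only [Option.getD_some]
    rw [if_pos (by omega)]
  | none =>
    simp only [Option.getD_none]
    rw [if_neg (by simp)]
    cases hg : firstHit (pLvl (PySem.Chars.lower s.toList)) digitsL with
    | some w =>
      obtain ⟨⟨c₁, hc₁, _, rfl⟩, _⟩ := firstHit_some _ digitsL hsort hg
      have := chVal_pos c₁ hc₁
      simp only [Option.getD_some]
      rw [if_pos (by omega)]
    | none =>
      simp
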